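-- pv_equiv track=rewrite | github.com/akhandsingh17/assignments | codingexercise/NonOverlappingSumTwoList.py | NonOverlappingSumTwoList
-- ===== SOURCE A (Python) =====
-- def NonOverlappingSumTwoList(ary1,ary2):
--
--     sum=0
--
--     for key in ary1:
--         if key not in ary2:
--             sum=sum+key
--
--     for key in ary2:
--         if key not in ary1:
--             sum=sum+key
--
--     return sum
-- ===== SOURCE B (Python) =====
-- def NonOverlappingSumTwoList(ary1, ary2):
--     # Sort both lists, then do a two-pointer merge: an element strictly smaller
--     # than the other side's cursor cannot occur there, so it is exclusive and
--     # added; on equality the whole equal run is skipped on both sides.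
--     xs = sorted(ary1)
--     ys = sorted(ary2)
--     n, m = len(xs), len(ys)
--     i = j = 0
--     total = 0
--     while i < n and j < m:
--         if xs[i] < ys[j]:
--             total += xs[i]
--             i += 1
--         elif ys[j] < xs[i]:
--             total += ys[j]
--             j += 1
--         else:
--             v = xs[i]
--             i += 1
--             while i < n and xs[i] == v:
--                 i += 1
--             j += 1
--             while j < m and ys[j] == v:
--                 j += 1
--     total += sum(xs[i:]) + sum(ys[j:])
--     return total
-- ===== Notes on version B (the rewrite author's own statement) =====
-- stated objective: faster
-- what changed: B sorts both lists and sums exclusive elements in a single two-pointer merge that skips equal runs on both sides, replacing A's per-element linear membership scan of the other list.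
import Mathlib
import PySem

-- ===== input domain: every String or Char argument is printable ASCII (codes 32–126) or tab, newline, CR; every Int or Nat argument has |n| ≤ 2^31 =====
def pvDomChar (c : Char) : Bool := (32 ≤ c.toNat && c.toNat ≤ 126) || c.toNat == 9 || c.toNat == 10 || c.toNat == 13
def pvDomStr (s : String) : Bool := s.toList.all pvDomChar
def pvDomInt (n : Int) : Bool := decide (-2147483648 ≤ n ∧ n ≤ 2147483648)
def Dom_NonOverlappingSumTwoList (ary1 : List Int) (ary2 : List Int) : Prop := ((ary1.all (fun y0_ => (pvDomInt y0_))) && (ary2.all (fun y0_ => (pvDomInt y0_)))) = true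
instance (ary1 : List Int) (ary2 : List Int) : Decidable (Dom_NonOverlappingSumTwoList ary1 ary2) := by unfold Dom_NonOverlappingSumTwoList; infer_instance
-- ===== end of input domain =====

-- B sorts both lists and sums exclusive elements in one two-pointer merge (skipping equal runs),
-- replacing A's per-element membership scans; objective: faster.

-- ===== PORT A =====
def NonOverlappingSumTwoList (ary1 : List Int) (ary2 : List Int) : Int :=
  -- sum = 0; for key in ary1: if key not in ary2: sum += key
  let sum1 := ary1.foldl (fun s key => if ary2.contains key then s else s + key) 0
  -- for key in ary2: if key not in ary1: sum += key
  ary2.foldl (fun s key => if ary1.contains key then s else s + key) sum1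

-- ===== PORT B =====
-- inner 'while … == v: skip' loops of Source B, on the current suffix
def pvSkipRun (v : Int) : List Int → List Int
  | [] => []
  | a :: t => if a == v then pvSkipRun v t else a :: t

theorem pvSkipRun_length_le (v : Int) : ∀ l : List Int, (pvSkipRun v l).length ≤ l.length := by
  intro l
  induction l with
  | nil => simp [pvSkipRun]
  | cons a t ih =>
      simp only [pvSkipRun]
      split
      · exact Nat.le_succ_of_le ih
      · simp

-- the outer while loop of Source B over the two sorted suffixes, with the 'total' accumulator
def pvMerge : List Int → List Int → Int → Int
  | [], ys, total => total + ys.sum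
  | x :: xs, [], total => total + (x :: xs).sum
  | x :: xs, y :: ys, total =>
      if x < y then pvMerge xs (y :: ys) (total + x)
      else if y < x then pvMerge (x :: xs) ys (total + y)
      else pvMerge (pvSkipRun x xs) (pvSkipRun x ys) total
termination_by xs ys _ => xs.length + ys.length
decreasing_by
  all_goals
    have h1 := pvSkipRun_length_le x xs
    have h2 := pvSkipRun_length_le x ys
    simp
    try omega

def NonOverlappingSumTwoList_alt (ary1 : List Int) (ary2 : List Int) : Int :=
  pvMerge (PySem.List.sorted ary1 (fun a => a) false) (PySem.List.sorted ary2 (fun a => a) false) 0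

-- ===== PRECONDITION & SPEC =====
def Spec_NonOverlappingSumTwoList (ary1 : List Int) (ary2 : List Int) (out : Int) : Prop := out = NonOverlappingSumTwoList_alt ary1 ary2
instance (ary1 : List Int) (ary2 : List Int) (out : Int) : Decidable (Spec_NonOverlappingSumTwoList ary1 ary2 out) := by unfold Spec_NonOverlappingSumTwoList; infer_instance

-- ===== CLAIM (what is proved, stated in full; the proofs are below) =====
def Claim_equal_NonOverlappingSumTwoList : Prop := ∀ (ary1 : List Int) (ary2 : List Int), Dom_NonOverlappingSumTwoList ary1 ary2 → Spec_NonOverlappingSumTwoList ary1 ary2 (NonOverlappingSumTwoList ary1 ary2)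

-- ===== LEMMAS AND PROOFS =====

-- sum of the elements of l that do not occur in o
def exSum (l o : List Int) : Int := (l.filter (fun a => ! o.contains a)).sum

theorem exSum_nil_left (o : List Int) : exSum [] o = 0 := rfl

theorem exSum_nil_right (l : List Int) : exSum l [] = l.sum := by
  simp [exSum]

theorem exSum_cons_not_mem {x : Int} {o : List Int} (l : List Int) (h : x ∉ o) :
    exSum (x :: l) o = x + exSum l o := by
  simp [exSum, h]

theorem exSum_cons_mem {x : Int} {o : List Int} (l : List Int) (h : x ∈ o) :
    exSum (x :: l) o = exSum l o := by
  simp [exSum, h]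

theorem exSum_congr_right {l o o' : List Int} (h : ∀ a ∈ l, (a ∈ o ↔ a ∈ o')) :
    exSum l o = exSum l o' := by
  unfold exSum
  rw [List.filter_congr]
  intro a ha
  by_cases hm : a ∈ o
  · simp [hm, (h a ha).mp hm]
  · have hm' : a ∉ o' := fun hc => hm ((h a ha).mpr hc)
    simp [hm, hm']

theorem exSum_cons_right_ne {l : List Int} (x : Int) (o : List Int) (h : ∀ a ∈ l, a ≠ x) :
    exSum l (x :: o) = exSum l o := by
  apply exSum_congr_right
  intro a ha
  simp [h a ha]

-- skip-run facts
theorem pvSkipRun_sublist (v : Int) : ∀ l : List Int, (pvSkipRun v l).Sublist l := by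
  intro l
  induction l with
  | nil => simp [pvSkipRun]
  | cons a t ih =>
      simp only [pvSkipRun]
      split
      · exact ih.cons a
      · exact List.Sublist.refl _

theorem pvSkipRun_decomp (v : Int) : ∀ l : List Int, ∃ k, l = List.replicate k v ++ pvSkipRun v l := by
  intro l
  induction l with
  | nil => exact ⟨0, rfl⟩
  | cons a t ih =>
      by_cases h : a = v
      · rcases ih with ⟨k, hk⟩
        exact ⟨k + 1, by simp [pvSkipRun, h, List.replicate_succ, ← hk]⟩
      · exact ⟨0, by simp [pvSkipRun, h]⟩

theorem gt_of_mem_pvSkipRun (v : Int) :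
    ∀ l : List Int, l.Pairwise (· ≤ ·) → (∀ a ∈ l, v ≤ a) →
      ∀ a ∈ pvSkipRun v l, v < a := by
  intro l
  induction l with
  | nil => simp [pvSkipRun]
  | cons b t ih =>
      intro hp hge a ha
      rcases List.pairwise_cons.mp hp with ⟨hb, hpt⟩
      by_cases hbv : b = v
      · simp only [pvSkipRun, hbv, beq_self_eq_true, if_true] at ha
        exact ih hpt (fun a ha' => hge a (List.mem_cons_of_mem _ ha')) a ha
      · simp only [pvSkipRun, beq_iff_eq, hbv, if_false] at ha
        have hvb : v < b := lt_of_le_of_ne (hge b (by simp)) (fun h => hbv h.symm)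
        rcases List.mem_cons.mp ha with rfl | hat
        · exact hvb
        · exact lt_of_lt_of_le hvb (hb a hat)

theorem mem_pvSkipRun_iff (v : Int) {l : List Int} (hp : l.Pairwise (· ≤ ·))
    (hge : ∀ a ∈ l, v ≤ a) (a : Int) :
    a ∈ pvSkipRun v l ↔ a ∈ l ∧ a ≠ v := by
  constructor
  · intro h
    exact ⟨(pvSkipRun_sublist v l).mem h, ne_of_gt (gt_of_mem_pvSkipRun v l hp hge a h)⟩
  · rintro ⟨hl, hne⟩
    rcases pvSkipRun_decomp v l with ⟨k, hk⟩
    rw [hk] at hl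
    rcases List.mem_append.mp hl with hrep | hs
    · exact absurd (List.eq_of_mem_replicate hrep) hne
    · exact hs

-- removing the leading run of a common value does not change the exclusive sum
theorem exSum_skip_left {l : List Int} (v : Int) (o : List Int) (hv : v ∈ o) :
    exSum l o = exSum (pvSkipRun v l) o := by
  rcases pvSkipRun_decomp v l with ⟨k, hk⟩
  have he : (List.replicate k v).filter (fun a => ! o.contains a) = [] := by
    apply List.filter_eq_nil_iff.mpr
    intro a ha
    simp [List.eq_of_mem_replicate ha, hv]
  conv_lhs => rw [hk]
  unfold exSum
  rw [List.filter_append, List.sum_append, he]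
  simp

-- the merge loop computes the two-sided exclusive sum, given both inputs sorted
theorem pvMerge_eq (xs ys : List Int) (total : Int) :
    xs.Pairwise (· ≤ ·) → ys.Pairwise (· ≤ ·) →
    pvMerge xs ys total = total + exSum xs ys + exSum ys xs := by
  induction xs, ys, total using pvMerge.induct with
  | case1 ys total =>
      intro _ _
      simp [pvMerge, exSum_nil_left, exSum_nil_right]
  | case2 x xs total =>
      intro _ _
      simp [pvMerge, exSum_nil_left, exSum_nil_right]
  | case3 x xs y ys total hlt ih =>
      intro hpx hpy
      rcases List.pairwise_cons.mp hpx with ⟨hx, hpx'⟩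
      have hYgt : ∀ a ∈ y :: ys, x < a := by
        intro a ha
        rcases List.pairwise_cons.mp hpy with ⟨hy, _⟩
        rcases List.mem_cons.mp ha with rfl | hat
        · exact hlt
        · exact lt_of_lt_of_le hlt (hy a hat)
      have hxnot : x ∉ y :: ys := fun h => lt_irrefl x (hYgt x h)
      rw [pvMerge, if_pos hlt, ih hpx' hpy,
          exSum_cons_not_mem xs hxnot,
          exSum_cons_right_ne x xs (fun a ha => ne_of_gt (hYgt a ha))]
      ring
  | case4 x xs y ys total hnlt hlt ih =>
      intro hpx hpy
      rcases List.pairwise_cons.mp hpy with ⟨hy, hpy'⟩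
      have hXgt : ∀ a ∈ x :: xs, y < a := by
        intro a ha
        rcases List.pairwise_cons.mp hpx with ⟨hx, _⟩
        rcases List.mem_cons.mp ha with rfl | hat
        · exact hlt
        · exact lt_of_lt_of_le hlt (hx a hat)
      have hynot : y ∉ x :: xs := fun h => lt_irrefl y (hXgt y h)
      rw [pvMerge, if_neg hnlt, if_pos hlt, ih hpx hpy',
          exSum_cons_not_mem ys hynot,
          exSum_cons_right_ne y ys (fun a ha => ne_of_gt (hXgt a ha))]
      ring
  | case5 x xs y ys total hnlt hnlt' ih =>
      intro hpx hpy
      have hxy : x = y := le_antisymm (not_lt.mp hnlt') (not_lt.mp hnlt)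
      subst hxy
      rcases List.pairwise_cons.mp hpx with ⟨hx, hpx'⟩
      rcases List.pairwise_cons.mp hpy with ⟨hy, hpy'⟩
      have hSx := gt_of_mem_pvSkipRun x xs hpx' hx
      have hSy := gt_of_mem_pvSkipRun x ys hpy' hy
      have hpsx : (pvSkipRun x xs).Pairwise (· ≤ ·) := hpx'.sublist (pvSkipRun_sublist x xs)
      have hpsy : (pvSkipRun x ys).Pairwise (· ≤ ·) := hpy'.sublist (pvSkipRun_sublist x ys)
      rw [pvMerge, if_neg hnlt, if_neg hnlt', ih hpsx hpsy]
      have e1 : exSum (x :: xs) (x :: ys) = exSum (pvSkipRun x xs) (pvSkipRun x ys) := by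
        rw [exSum_cons_mem xs (by simp), exSum_skip_left x (x :: ys) (by simp)]
        apply exSum_congr_right
        intro a ha
        have hane : a ≠ x := ne_of_gt (hSx a ha)
        rw [mem_pvSkipRun_iff x hpy' hy a]
        simp [hane]
      have e2 : exSum (x :: ys) (x :: xs) = exSum (pvSkipRun x ys) (pvSkipRun x xs) := by
        rw [exSum_cons_mem ys (by simp), exSum_skip_left x (x :: xs) (by simp)]
        apply exSum_congr_right
        intro a ha
        have hane : a ≠ x := ne_of_gt (hSy a ha)
        rw [mem_pvSkipRun_iff x hpx' hx a]
        simp [hane]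
      rw [e1, e2]

-- A's accumulation loop is an exclusive sum
theorem foldl_eq_exSum (o : List Int) :
    ∀ (l : List Int) (init : Int),
      l.foldl (fun s key => if o.contains key then s else s + key) init = init + exSum l o := by
  intro l
  induction l with
  | nil => intro init; simp [exSum_nil_left]
  | cons x t ih =>
      intro init
      by_cases h : x ∈ o
      · simp only [List.foldl_cons, List.contains_iff_mem.mpr h, if_true, ih,
          exSum_cons_mem t h]
      · have hc : o.contains x = false := by simp [h]
        simp only [List.foldl_cons, hc, Bool.false_eq_true, if_false, ih,
          exSum_cons_not_mem t h]
        ring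

-- exSum only depends on the multisets of its arguments
theorem exSum_perm {l l' o o' : List Int} (hl : l.Perm l') (ho : o.Perm o') :
    exSum l o = exSum l' o' := by
  have h1 : exSum l o = exSum l o' := exSum_congr_right (fun a _ => ho.mem_iff)
  rw [h1]
  unfold exSum
  exact (hl.filter _).sum_eq

-- ===== VERDICT (by name: the statement is the Claim_ definition above) =====
theorem NonOverlappingSumTwoList_spec : Claim_equal_NonOverlappingSumTwoList := by
  intro ary1 ary2 _
  unfold Spec_NonOverlappingSumTwoList NonOverlappingSumTwoList NonOverlappingSumTwoList_alt
  rw [pvMerge_eq _ _ 0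
        (by simpa using PySem.List.sorted_pairwise ary1 (fun a => a))
        (by simpa using PySem.List.sorted_pairwise ary2 (fun a => a)),
      foldl_eq_exSum ary2 ary1 0, foldl_eq_exSum ary1 ary2,
      exSum_perm (PySem.List.sorted_perm ary1 (fun a => a) false) (PySem.List.sorted_perm ary2 (fun a => a) false),
      exSum_perm (PySem.List.sorted_perm ary2 (fun a => a) false) (PySem.List.sorted_perm ary1 (fun a => a) false)]
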